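-- pv_equiv track=rewrite | github.com/shatianming5/open-problem-atlas | verifiers/checkers/math/cerny_checker.py | _is_synchronizing
-- ===== SOURCE A (Python) =====
-- def _apply_letter(states: frozenset, trans: list[int]) -> frozenset:
--     return frozenset(trans[s] for s in states)
--
-- def _is_synchronizing(trans_a: list[int], trans_b: list[int], n: int) -> tuple:
--     """Check if DFA with two transition functions is synchronizing.
--     Returns (is_sync, shortest_sync_length) using BFS on subsets.
--     """
--     start = frozenset(range(n))
--     if len(start) == 1:
--         return (True, 0)
--
--     visited = {start: 0}
--     queue = [start]
--     head = 0
--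
--     while head < len(queue):
--         current = queue[head]
--         head += 1
--         dist = visited[current]
--
--         for trans in [trans_a, trans_b]:
--             nxt = _apply_letter(current, trans)
--             if len(nxt) == 1:
--                 return (True, dist + 1)
--             if nxt not in visited:
--                 visited[nxt] = dist + 1
--                 queue.append(nxt)
--
--     return (False, -1)
-- ===== SOURCE B (Python) =====
-- def _is_synchronizing(trans_a: list[int], trans_b: list[int], n: int) -> tuple:
--     """Iterate the image operator on the family of all subsets reachable at the
--     current word length: no visited set of subsets and no per-subset distances.
--     A repeated family means the trajectory is periodic, hence never synchronizing;
--     the 2**n level cap is the trivial bound on the shortest synchronizing length."""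
--     start = frozenset(range(n))
--     if len(start) == 1:
--         return (True, 0)
--     fam = {start}
--     seen = set()
--     for depth in range(1, 2 ** max(n, 0) + 1):
--         key = frozenset(fam)
--         if key in seen:
--             return (False, -1)
--         seen.add(key)
--         fam = {frozenset(t[s] for s in S) for S in fam for t in (trans_a, trans_b)}
--         if any(len(S) == 1 for S in fam):
--             return (True, depth)
--     return (False, -1)
-- ===== Notes on version B (the rewrite author's own statement) =====
-- stated objective: alternative
-- what changed: A's forward BFS over subsets (queue, visited set, per-subset distance dictionary) is replaced by iterating the image operator on the whole family of subsets reachable at the current word length, with a repeated-family cycle check and a 2**n level cap; no subset is marked visited and no distances are stored.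
-- outside the precondition, e.g. on _is_synchronizing([-1, -1], [-1, -1], 2): A returns (True, 1), B returns (True, 1); on _is_synchronizing([2, -1, 4], [4, 0, 2], 2): A returns (True, 2), B raises IndexError; on _is_synchronizing([2, 0], [0, 1], 2): A raises IndexError, B raises IndexError
import Mathlib
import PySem

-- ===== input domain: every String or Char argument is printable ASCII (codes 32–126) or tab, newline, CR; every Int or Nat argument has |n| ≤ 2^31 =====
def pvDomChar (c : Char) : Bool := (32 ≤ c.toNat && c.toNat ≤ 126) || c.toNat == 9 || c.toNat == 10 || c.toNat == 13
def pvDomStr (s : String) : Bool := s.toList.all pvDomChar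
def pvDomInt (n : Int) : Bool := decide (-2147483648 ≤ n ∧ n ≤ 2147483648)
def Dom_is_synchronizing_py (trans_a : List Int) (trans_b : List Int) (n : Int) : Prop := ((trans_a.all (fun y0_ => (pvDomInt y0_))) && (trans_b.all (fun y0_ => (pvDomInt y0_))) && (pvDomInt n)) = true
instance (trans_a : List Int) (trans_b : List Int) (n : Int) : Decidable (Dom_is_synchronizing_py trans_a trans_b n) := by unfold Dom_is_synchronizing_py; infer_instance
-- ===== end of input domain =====

-- B replaces A's forward subset-BFS (visited set + per-subset distances + queue) by
-- iteration of the image operator on the whole family of subsets reachable at the current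
-- word length, with a repeated-family cycle check and a 2^n level cap; alternative
-- decomposition of similar cost.


-- A Python frozenset of ints is represented canonically as its strictly increasing
-- list of elements; `canonIns`/`canonSet` build that canonical form.
def canonIns (x : Int) : List Int → List Int
  | [] => [x]
  | y :: ys => if x < y then x :: y :: ys else if x = y then y :: ys else y :: canonIns x ys

def canonSet (l : List Int) : List Int := l.foldr canonIns []

-- ===== PORT A =====
-- frozenset(trans[s] for s in states); trans[s] is in range on every input Pre_ admits,
-- so the default of pyGetD is never used there.
def applyLetterA (states : List Int) (trans : List Int) : List Int :=
  canonSet (states.map (fun s => PySem.List.pyGetD trans s 0))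

-- the while loop of A; fuel 2^n + 1 exceeds the number of iterations (= final queue
-- length ≤ number of distinct subsets of range n), so the fuel-0 branch is unreachable
-- on inputs Pre_ admits.
def loopA (ta tb : List Int) (fuel : Nat) (visited : PySem.Dict (List Int) Int)
    (queue : List (List Int)) (head : Nat) : Bool × Int :=
  match fuel with
  | 0 => (false, -1)
  | f + 1 =>
    if h : head < queue.length then
      let current := queue[head]
      let dist := visited.getD current 0   -- visited[current]; always present under Pre_
      let nxt1 := applyLetterA current ta
      if nxt1.length = 1 then (true, dist + 1)
      else
        let v1 := if visited.contains nxt1 then visited else visited.insert nxt1 (dist + 1)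
        let q1 := if visited.contains nxt1 then queue else queue ++ [nxt1]
        let nxt2 := applyLetterA current tb
        if nxt2.length = 1 then (true, dist + 1)
        else
          let v2 := if v1.contains nxt2 then v1 else v1.insert nxt2 (dist + 1)
          let q2 := if v1.contains nxt2 then q1 else q1 ++ [nxt2]
          loopA ta tb f v2 q2 (head + 1)
    else (false, -1)

def is_synchronizing_py (trans_a : List Int) (trans_b : List Int) (n : Int) : Bool × Int :=
  let start := canonSet (PySem.List.pyRange 0 n 1)
  if start.length = 1 then (true, 0)
  else loopA trans_a trans_b (2 ^ n.toNat + 1) (PySem.Dict.empty.insert start 0) [start] 0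

-- ===== PORT B =====
-- A Python frozenset of frozensets is represented canonically as the list of its member
-- subsets (each canonical) sorted strictly by the lexicographic order on List Int, so
-- Lean list equality models Python set equality.
def famIns (x : List Int) : List (List Int) → List (List Int)
  | [] => [x]
  | y :: ys => if x < y then x :: y :: ys else if x = y then y :: ys else y :: famIns x ys

def famCanon (l : List (List Int)) : List (List Int) := l.foldr famIns []

-- {frozenset(t[s] for s in S) for S in fam for t in (trans_a, trans_b)}
def famStep (ta tb : List Int) (fam : List (List Int)) : List (List Int) :=
  famCanon (fam.flatMap (fun S =>
    [canonSet (S.map (fun s => PySem.List.pyGetD ta s 0)),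
     canonSet (S.map (fun s => PySem.List.pyGetD tb s 0))]))

-- the `for depth in range(1, 2**max(n,0)+1)` loop of B: fuel is exactly the number of
-- remaining loop iterations, so the fuel-0 branch is the loop running to completion.
def loopF (ta tb : List Int) (fuel : Nat) (seen : List (List (List Int)))
    (fam : List (List Int)) (depth : Int) : Bool × Int :=
  match fuel with
  | 0 => (false, -1)
  | f + 1 =>
    if fam ∈ seen then (false, -1)
    else
      let fam' := famStep ta tb fam
      if fam'.any (fun S => S.length == 1) then (true, depth)
      else loopF ta tb f (seen ++ [fam]) fam' (depth + 1)

def is_synchronizing_py_alt (trans_a : List Int) (trans_b : List Int) (n : Int) : Bool × Int :=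
  let start := canonSet (PySem.List.pyRange 0 n 1)
  if start.length = 1 then (true, 0)
  else loopF trans_a trans_b (2 ^ (max n 0).toNat) [] [start] 1

-- ===== PRECONDITION & SPEC =====
-- Pre_ admits trivial automata (n ≤ 1) and well-formed transition tables (both of
-- length n with all states in [0, n)).  Outside it A raises IndexError on an
-- out-of-range state actually reached, or returns via Python's negative-index
-- wraparound, which the ports do not model.
def Pre_is_synchronizing_py (trans_a : List Int) (trans_b : List Int) (n : Int) : Prop :=
  n ≤ 1 ∨ ((trans_a.length : Int) = n ∧ (trans_b.length : Int) = n ∧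
    (∀ v ∈ trans_a, 0 ≤ v ∧ v < n) ∧ (∀ v ∈ trans_b, 0 ≤ v ∧ v < n))
instance (trans_a : List Int) (trans_b : List Int) (n : Int) : Decidable (Pre_is_synchronizing_py trans_a trans_b n) := by unfold Pre_is_synchronizing_py; infer_instance

def pvWitness_is_synchronizing_py : List Int × List Int × Int := ([1, 1, 0], [0, 2, 1], 3)

def Spec_is_synchronizing_py (trans_a : List Int) (trans_b : List Int) (n : Int) (out : Bool × Int) : Prop := out = is_synchronizing_py_alt trans_a trans_b n
instance (trans_a : List Int) (trans_b : List Int) (n : Int) (out : Bool × Int) : Decidable (Spec_is_synchronizing_py trans_a trans_b n out) := by unfold Spec_is_synchronizing_py; infer_instance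

-- ===== CLAIM (what is proved, stated in full; the proofs are below) =====
def Claim_equal_is_synchronizing_py : Prop := ∀ (trans_a : List Int) (trans_b : List Int) (n : Int), Dom_is_synchronizing_py trans_a trans_b n → Pre_is_synchronizing_py trans_a trans_b n → Spec_is_synchronizing_py trans_a trans_b n (is_synchronizing_py trans_a trans_b n)

-- ===== LEMMAS AND PROOFS =====

-- canonical-form facts
theorem mem_canonIns (x y : Int) (l : List Int) : y ∈ canonIns x l ↔ y = x ∨ y ∈ l := by
  induction l with
  | nil => simp [canonIns]
  | cons z zs ih =>
    simp only [canonIns]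
    split_ifs with h1 h2
    · simp only [List.mem_cons]
    · subst h2
      simp only [List.mem_cons]
      tauto
    · simp only [List.mem_cons, ih]
      tauto

theorem sorted_canonIns (x : Int) (l : List Int) (h : l.Pairwise (· < ·)) :
    (canonIns x l).Pairwise (· < ·) := by
  induction l with
  | nil => simp [canonIns]
  | cons z zs ih =>
    rw [List.pairwise_cons] at h
    simp only [canonIns]
    split_ifs with h1 h2
    · exact List.pairwise_cons.mpr ⟨by
        intro a ha
        rcases List.mem_cons.mp ha with rfl | ha
        · exact h1
        · exact lt_trans h1 (h.1 a ha), List.pairwise_cons.mpr h⟩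
    · exact List.pairwise_cons.mpr h
    · refine List.pairwise_cons.mpr ⟨?_, ih h.2⟩
      intro a ha
      rcases (mem_canonIns x a zs).mp ha with rfl | ha
      · omega
      · exact h.1 a ha

theorem mem_canonSet (y : Int) (l : List Int) : y ∈ canonSet l ↔ y ∈ l := by
  induction l with
  | nil => simp [canonSet]
  | cons z zs ih =>
    simp only [canonSet, List.foldr_cons] at *
    rw [mem_canonIns, ih]
    simp [List.mem_cons]

theorem sorted_canonSet (l : List Int) : (canonSet l).Pairwise (· < ·) := by
  induction l with
  | nil => simp [canonSet]
  | cons z zs ih => exact sorted_canonIns z _ ih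

-- InCanon n l: l is the canonical representation of a subset of range n
def InCanon (n : Int) (l : List Int) : Prop :=
  l.Pairwise (· < ·) ∧ ∀ x ∈ l, 0 ≤ x ∧ x < n

theorem InCanon_of_nonpos {n : Int} {l : List Int} (hn : n ≤ 0) (h : InCanon n l) : l = [] := by
  cases l with
  | nil => rfl
  | cons x xs => exact absurd (h.2 x (List.mem_cons_self)) (by omega)

theorem canon_eq_of_mem_iff {l1 l2 : List Int} (h1 : l1.Pairwise (· < ·))
    (h2 : l2.Pairwise (· < ·)) (hm : ∀ x, x ∈ l1 ↔ x ∈ l2) : l1 = l2 := by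
  have hn1 : l1.Nodup := h1.imp (fun h => ne_of_lt h)
  have hn2 : l2.Nodup := h2.imp (fun h => ne_of_lt h)
  refine List.Perm.eq_of_pairwise (fun a b _ _ hab hba => le_antisymm hab hba) ?_ ?_ ?_
  · exact h1.imp (fun h => le_of_lt h)
  · exact h2.imp (fun h => le_of_lt h)
  · refine List.perm_of_nodup_nodup_toFinset_eq hn1 hn2 ?_
    ext x
    simp [List.mem_toFinset, hm]

-- cardinality: at most 2^n distinct canonical subsets of range n
theorem card_canon (n : Int) (L : List (List Int)) (hnd : L.Nodup)
    (hc : ∀ l ∈ L, InCanon n l) : L.length ≤ 2 ^ n.toNat := by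
  classical
  set S : Finset Int := (Finset.range n.toNat).image (Int.ofNat) with hS
  have hmap : ∀ l ∈ L, l.toFinset ∈ S.powerset := by
    intro l hl
    rw [Finset.mem_powerset]
    intro x hx
    rw [List.mem_toFinset] at hx
    have hx' := (hc l hl).2 x hx
    rw [hS]
    simp only [Finset.mem_image, Finset.mem_range]
    refine ⟨x.toNat, by omega, ?_⟩
    simp [Int.ofNat_toNat]
    omega
  have hinj : ∀ l1 ∈ L, ∀ l2 ∈ L, l1.toFinset = l2.toFinset → l1 = l2 := by
    intro l1 h1 l2 h2 he
    refine canon_eq_of_mem_iff (hc l1 h1).1 (hc l2 h2).1 (fun x => ?_)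
    rw [← List.mem_toFinset, ← List.mem_toFinset (l := l2), he]
  have hnd2 : (L.map List.toFinset).Nodup := by
    rw [List.nodup_map_iff_inj_on hnd]
    exact hinj
  have hsub : ∀ f ∈ L.map List.toFinset, f ∈ S.powerset := by
    intro f hf
    rcases List.mem_map.mp hf with ⟨l, hl, rfl⟩
    exact hmap l hl
  have hlen : (L.map List.toFinset).length ≤ S.powerset.card := by
    rw [← List.toFinset_card_of_nodup hnd2]
    exact Finset.card_le_card (fun f hf => hsub f (List.mem_toFinset.mp hf))
  have hcardS : S.card ≤ n.toNat := le_trans (Finset.card_image_le) (by simp)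
  calc L.length = (L.map List.toFinset).length := by rw [List.length_map]
    _ ≤ S.powerset.card := hlen
    _ = 2 ^ S.card := Finset.card_powerset S
    _ ≤ 2 ^ n.toNat := Nat.pow_le_pow_right (by norm_num) hcardS

theorem canonSet_map_eq_applyLetterA (c t : List Int) :
    canonSet (c.map (fun s => PySem.List.pyGetD t s 0)) = applyLetterA c t := rfl

theorem getElem_append_cons_self {α : Type} (u v : List α) (x : α)
    (h : u.length < (u ++ (x :: v)).length) : (u ++ (x :: v))[u.length] = x := by
  rw [List.getElem_append_right (Nat.le_refl u.length)]
  simp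

-- ----- the level-synchronized view of A's BFS (proof-only helpers) -----
-- levelB processes one BFS level: the frontier against the visited set; loopB runs the
-- levels.  A is first proved equal to this level BFS, which is then proved equal to B's
-- family iteration.
def levelB (ta tb : List Int) (frontier : List (List Int)) (visited : PySem.Set (List Int))
    (nf : List (List Int)) (depth : Int) :
    Sum (Bool × Int) (PySem.Set (List Int) × List (List Int)) :=
  match frontier with
  | [] => .inr (visited, nf)
  | cur :: rest =>
    let n1 := canonSet (cur.map (fun s => PySem.List.pyGetD ta s 0))
    if n1.length = 1 then .inl (true, depth + 1)
    else
      let v1 := if PySem.Set.contains visited n1 then visited else PySem.Set.add visited n1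
      let nf1 := if PySem.Set.contains visited n1 then nf else nf ++ [n1]
      let n2 := canonSet (cur.map (fun s => PySem.List.pyGetD tb s 0))
      if n2.length = 1 then .inl (true, depth + 1)
      else
        let v2 := if PySem.Set.contains v1 n2 then v1 else PySem.Set.add v1 n2
        let nf2 := if PySem.Set.contains v1 n2 then nf1 else nf1 ++ [n2]
        levelB ta tb rest v2 nf2 depth

def loopB (ta tb : List Int) (fuel : Nat) (visited : PySem.Set (List Int))
    (frontier : List (List Int)) (depth : Int) : Bool × Int :=
  match fuel with
  | 0 => (false, -1)
  | f + 1 =>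
    match frontier with
    | [] => (false, -1)
    | _ :: _ =>
      match levelB ta tb frontier visited [] depth with
      | .inl r => r
      | .inr (v', nf') => loopB ta tb f v' nf' (depth + 1)

theorem contains_eq_of_keys (vA : PySem.Dict (List Int) Int) (L : List (List Int))
    (h : vA.keys = L) (k : List Int) : PySem.Set.contains L k = vA.contains k := by
  rw [Bool.eq_iff_iff, PySem.Set.contains_iff, PySem.Dict.contains_iff_mem_keys, h]

theorem set_add_of_contains_false {s : PySem.Set (List Int)} {x : List Int}
    (h : PySem.Set.contains s x = false) : PySem.Set.add s x = s ++ [x] := by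
  have hx : x ∉ s := by
    intro hm
    have hc := (PySem.Set.contains_iff s x).mpr hm
    rw [hc] at h
    simp at h
  simp [PySem.Set.add, PySem.Set.contains, hx]

-- one-step unfolding of loopA with the queue split at the head index
theorem loopA_step (ta tb : List Int) (f : Nat) (vA : PySem.Dict (List Int) Int)
    (u w : List (List Int)) (c : List Int) :
    loopA ta tb (f + 1) vA (u ++ c :: w) u.length =
      (let dist := vA.getD c 0
       let nxt1 := applyLetterA c ta
       if nxt1.length = 1 then (true, dist + 1)
       else
         let v1 := if vA.contains nxt1 then vA else vA.insert nxt1 (dist + 1)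
         let q1 := if vA.contains nxt1 then u ++ c :: w else (u ++ c :: w) ++ [nxt1]
         let nxt2 := applyLetterA c tb
         if nxt2.length = 1 then (true, dist + 1)
         else
           let v2 := if v1.contains nxt2 then v1 else v1.insert nxt2 (dist + 1)
           let q2 := if v1.contains nxt2 then q1 else q1 ++ [nxt2]
           loopA ta tb f v2 q2 (u.length + 1)) := by
  have hlen : u.length < (u ++ c :: w).length := by simp
  have hget : (u ++ c :: w)[u.length]'hlen = c := getElem_append_cons_self u w c hlen
  simp only [loopA]
  rw [dif_pos hlen, hget]

-- one level of A's queue BFS equals one level of the level BFS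
theorem level_step (ta tb : List Int) (d : Int) :
  ∀ (F : List (List Int)) (g : Nat) (u nf : List (List Int))
    (vA : PySem.Dict (List Int) Int),
  (∀ c ∈ F, vA.get? c = some d) →
  (∀ c ∈ nf, vA.get? c = some (d + 1)) →
  vA.keys = u ++ F ++ nf →
  ((∀ r, levelB ta tb F (u ++ F ++ nf) nf d = .inl r →
      loopA ta tb (F.length + g) vA (u ++ F ++ nf) u.length = r)
   ∧ (∀ v' nf', levelB ta tb F (u ++ F ++ nf) nf d = .inr (v', nf') →
      ∃ vA' : PySem.Dict (List Int) Int,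
        vA'.keys = u ++ F ++ nf' ∧ v' = u ++ F ++ nf' ∧
        (∀ c ∈ nf', vA'.get? c = some (d + 1)) ∧
        (∀ c ∈ nf', c ∈ nf ∨ ∃ cc ∈ F, c = applyLetterA cc ta ∨ c = applyLetterA cc tb) ∧
        (vA.keys.Nodup → vA'.keys.Nodup) ∧
        loopA ta tb (F.length + g) vA (u ++ F ++ nf) u.length
          = loopA ta tb g vA' (u ++ F ++ nf') (u ++ F).length)) := by
  intro F
  induction F with
  | nil =>
    intro g u nf vA _ hnf hkeys
    constructor
    · intro r hr
      simp [levelB] at hr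
    · intro v' nf' hr
      simp only [levelB, Sum.inr.injEq, Prod.mk.injEq] at hr
      obtain ⟨rfl, rfl⟩ := hr
      refine ⟨vA, hkeys, rfl, hnf, fun c hc => Or.inl hc, fun h => h, ?_⟩
      simp
  | cons cur rest ih =>
    intro g u nf vA hF hnf hkeys
    have hd : vA.getD cur 0 = d :=
      PySem.Dict.getD_of_get?_eq_some _ _ (hF cur List.mem_cons_self)
    have hkeys' : vA.keys = u ++ cur :: (rest ++ nf) := by
      rw [hkeys]; simp [List.append_assoc]
    have hfuel : (cur :: rest).length + g = (rest.length + g) + 1 := by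
      simp [List.length_cons]; omega
    have finish : ∀ (nf2 : List (List Int)) (v2 : PySem.Dict (List Int) Int),
        (∀ c ∈ rest, v2.get? c = some d) →
        (∀ c ∈ nf2, v2.get? c = some (d + 1)) →
        v2.keys = u ++ cur :: (rest ++ nf2) →
        (∀ c ∈ nf2, c ∈ nf ∨ c = applyLetterA cur ta ∨ c = applyLetterA cur tb) →
        (vA.keys.Nodup → v2.keys.Nodup) →
        ((∀ r, levelB ta tb rest (u ++ cur :: (rest ++ nf2)) nf2 d = .inl r →
            loopA ta tb (rest.length + g) v2 (u ++ cur :: (rest ++ nf2)) (u.length + 1) = r)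
         ∧ (∀ v' nf', levelB ta tb rest (u ++ cur :: (rest ++ nf2)) nf2 d = .inr (v', nf') →
            ∃ vA' : PySem.Dict (List Int) Int,
              vA'.keys = u ++ cur :: (rest ++ nf') ∧ v' = u ++ cur :: (rest ++ nf') ∧
              (∀ c ∈ nf', vA'.get? c = some (d + 1)) ∧
              (∀ c ∈ nf', c ∈ nf ∨ ∃ cc ∈ cur :: rest, c = applyLetterA cc ta ∨ c = applyLetterA cc tb) ∧
              (vA.keys.Nodup → vA'.keys.Nodup) ∧
              loopA ta tb (rest.length + g) v2 (u ++ cur :: (rest ++ nf2)) (u.length + 1)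
                = loopA ta tb g vA' (u ++ cur :: (rest ++ nf')) (u ++ cur :: rest).length)) := by
      intro nf2 v2 h1 h2 h3 h4 h5
      obtain ⟨ih1, ih2⟩ := ih g (u ++ [cur]) nf2 v2 h1 h2
        (by simpa [List.append_assoc] using h3)
      constructor
      · intro r hr
        have := ih1 r (by simpa [List.append_assoc] using hr)
        simpa [List.append_assoc] using this
      · intro v' nf' hr
        obtain ⟨vA', k1, k2, k3, k4, k6, k5⟩ := ih2 v' nf' (by simpa [List.append_assoc] using hr)
        refine ⟨vA', by simpa [List.append_assoc] using k1,
          by simpa [List.append_assoc] using k2, k3, ?_, fun h => k6 (h5 h),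
          by simpa [List.append_assoc] using k5⟩
        intro c hc
        rcases k4 c hc with hcnf2 | ⟨cc, hcc, hccc⟩
        · rcases h4 c hcnf2 with h | h | h
          · exact Or.inl h
          · exact Or.inr ⟨cur, List.mem_cons_self, Or.inl h⟩
          · exact Or.inr ⟨cur, List.mem_cons_self, Or.inr h⟩
        · exact Or.inr ⟨cc, List.mem_cons_of_mem _ hcc, hccc⟩
    rw [hfuel]
    simp only [List.append_assoc, List.cons_append]
    rw [loopA_step, hd]
    simp only [levelB, canonSet_map_eq_applyLetterA]
    rw [contains_eq_of_keys vA _ hkeys']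
    by_cases hl1 : (applyLetterA cur ta).length = 1
    · simp only [if_pos hl1]
      constructor
      · intro r hr
        cases hr
        rfl
      · intro v' nf' hr
        cases hr
    · simp only [if_neg hl1]
      by_cases hm1 : vA.contains (applyLetterA cur ta) = true
      · -- first successor already visited
        simp only [hm1, if_true]
        rw [contains_eq_of_keys vA _ hkeys']
        by_cases hl2 : (applyLetterA cur tb).length = 1
        · simp only [if_pos hl2]
          constructor
          · intro r hr
            cases hr
            rfl
          · intro v' nf' hr
            cases hr
        · simp only [if_neg hl2]
          by_cases hm2 : vA.contains (applyLetterA cur tb) = true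
          · simp only [hm2, if_true]
            exact finish nf vA (fun c hc => hF c (List.mem_cons_of_mem _ hc)) hnf hkeys'
              (fun c hc => Or.inl hc) (fun h => h)
          · have hm2' : vA.contains (applyLetterA cur tb) = false := by
              rwa [Bool.not_eq_true] at hm2
            have hnm2 : applyLetterA cur tb ∉ vA.keys := fun hmem =>
              hm2 ((PySem.Dict.contains_iff_mem_keys _ _).mpr hmem)
            simp only [hm2', Bool.false_eq_true, if_false]
            rw [set_add_of_contains_false (by rw [contains_eq_of_keys vA _ hkeys']; exact hm2')]
            have hkeys2 : (vA.insert (applyLetterA cur tb) (d + 1)).keys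
                = u ++ cur :: (rest ++ (nf ++ [applyLetterA cur tb])) := by
              rw [PySem.Dict.keys_insert_of_not_contains _ _ hm2', hkeys']
              simp [List.append_assoc]
            have := finish (nf ++ [applyLetterA cur tb]) (vA.insert (applyLetterA cur tb) (d + 1))
              (fun c hc => by
                have hcmem : c ∈ vA.keys := by
                  rw [hkeys']
                  simp only [List.mem_append, List.mem_cons]
                  exact Or.inr (Or.inr (Or.inl hc))
                rw [PySem.Dict.get?_insert_of_ne _ _ (fun he => hnm2 (by rw [← he]; exact hcmem))]
                exact hF c (List.mem_cons_of_mem _ hc))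
              (fun c hc => by
                rcases List.mem_append.mp hc with hc | hc
                · have hcmem : c ∈ vA.keys := by
                    rw [hkeys']
                    simp only [List.mem_append, List.mem_cons]
                    exact Or.inr (Or.inr (Or.inr hc))
                  rw [PySem.Dict.get?_insert_of_ne _ _ (fun he => hnm2 (by rw [← he]; exact hcmem))]
                  exact hnf c hc
                · rw [List.mem_singleton.mp hc]
                  exact PySem.Dict.get?_insert_self _ _ _)
              hkeys2
              (fun c hc => by
                rcases List.mem_append.mp hc with hc | hc
                · exact Or.inl hc
                · exact Or.inr (Or.inr (List.mem_singleton.mp hc)))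
              (fun h => PySem.Dict.nodup_keys_insert _ _ _ h)
            simpa [List.append_assoc] using this
      · -- first successor is new: it is inserted with distance d+1 and appended
        have hm1' : vA.contains (applyLetterA cur ta) = false := by
          rwa [Bool.not_eq_true] at hm1
        have hnm1 : applyLetterA cur ta ∉ vA.keys := fun hmem =>
          hm1 ((PySem.Dict.contains_iff_mem_keys _ _).mpr hmem)
        simp only [hm1', Bool.false_eq_true, if_false]
        rw [set_add_of_contains_false (by rw [contains_eq_of_keys vA _ hkeys']; exact hm1')]
        have hkeys1 : (vA.insert (applyLetterA cur ta) (d + 1)).keys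
            = (u ++ cur :: (rest ++ nf)) ++ [applyLetterA cur ta] := by
          rw [PySem.Dict.keys_insert_of_not_contains _ _ hm1', hkeys']
        have hF1 : ∀ c ∈ rest, (vA.insert (applyLetterA cur ta) (d + 1)).get? c = some d := by
          intro c hc
          have hcmem : c ∈ vA.keys := by
            rw [hkeys']
            simp only [List.mem_append, List.mem_cons]
            exact Or.inr (Or.inr (Or.inl hc))
          rw [PySem.Dict.get?_insert_of_ne _ _ (fun he => hnm1 (by rw [← he]; exact hcmem))]
          exact hF c (List.mem_cons_of_mem _ hc)
        have hnf1 : ∀ c ∈ nf ++ [applyLetterA cur ta],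
            (vA.insert (applyLetterA cur ta) (d + 1)).get? c = some (d + 1) := by
          intro c hc
          rcases List.mem_append.mp hc with hc | hc
          · have hcmem : c ∈ vA.keys := by
              rw [hkeys']
              simp only [List.mem_append, List.mem_cons]
              exact Or.inr (Or.inr (Or.inr hc))
            rw [PySem.Dict.get?_insert_of_ne _ _ (fun he => hnm1 (by rw [← he]; exact hcmem))]
            exact hnf c hc
          · rw [List.mem_singleton.mp hc]
            exact PySem.Dict.get?_insert_self _ _ _
        rw [contains_eq_of_keys (vA.insert (applyLetterA cur ta) (d + 1)) _ hkeys1]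
        by_cases hl2 : (applyLetterA cur tb).length = 1
        · simp only [if_pos hl2]
          constructor
          · intro r hr
            cases hr
            rfl
          · intro v' nf' hr
            cases hr
        · simp only [if_neg hl2]
          by_cases hm2 : (vA.insert (applyLetterA cur ta) (d + 1)).contains (applyLetterA cur tb) = true
          · -- second successor already visited
            simp only [hm2, if_true]
            have := finish (nf ++ [applyLetterA cur ta]) (vA.insert (applyLetterA cur ta) (d + 1))
              hF1 hnf1
              (by rw [hkeys1]; simp [List.append_assoc])
              (fun c hc => by
                rcases List.mem_append.mp hc with hc | hc
                · exact Or.inl hc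
                · exact Or.inr (Or.inl (List.mem_singleton.mp hc)))
              (fun h => PySem.Dict.nodup_keys_insert _ _ _ h)
            simpa [List.append_assoc] using this
          · -- both successors are new
            have hm2' : (vA.insert (applyLetterA cur ta) (d + 1)).contains (applyLetterA cur tb) = false := by
              rwa [Bool.not_eq_true] at hm2
            have hnm2 : applyLetterA cur tb ∉ (vA.insert (applyLetterA cur ta) (d + 1)).keys :=
              fun hmem => hm2 ((PySem.Dict.contains_iff_mem_keys _ _).mpr hmem)
            simp only [hm2', Bool.false_eq_true, if_false]
            rw [set_add_of_contains_false
              (by rw [contains_eq_of_keys (vA.insert (applyLetterA cur ta) (d + 1)) _ hkeys1]; exact hm2')]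
            have hkeys2 : ((vA.insert (applyLetterA cur ta) (d + 1)).insert (applyLetterA cur tb) (d + 1)).keys
                = ((u ++ cur :: (rest ++ nf)) ++ [applyLetterA cur ta]) ++ [applyLetterA cur tb] := by
              rw [PySem.Dict.keys_insert_of_not_contains _ _ hm2', hkeys1]
            have := finish ((nf ++ [applyLetterA cur ta]) ++ [applyLetterA cur tb])
              ((vA.insert (applyLetterA cur ta) (d + 1)).insert (applyLetterA cur tb) (d + 1))
              (fun c hc => by
                have hcmem : c ∈ (vA.insert (applyLetterA cur ta) (d + 1)).keys := by
                  rw [hkeys1]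
                  simp only [List.mem_append, List.mem_cons]
                  exact Or.inl (Or.inr (Or.inr (Or.inl hc)))
                rw [PySem.Dict.get?_insert_of_ne _ _ (fun he => hnm2 (by rw [← he]; exact hcmem))]
                exact hF1 c hc)
              (fun c hc => by
                rcases List.mem_append.mp hc with hc | hc
                · have hcmem : c ∈ (vA.insert (applyLetterA cur ta) (d + 1)).keys := by
                    rw [hkeys1]
                    rcases List.mem_append.mp hc with hc2 | hc2
                    · simp only [List.mem_append, List.mem_cons]
                      exact Or.inl (Or.inr (Or.inr (Or.inr hc2)))
                    · simp only [List.mem_append]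
                      exact Or.inr hc2
                  rw [PySem.Dict.get?_insert_of_ne _ _ (fun he => hnm2 (by rw [← he]; exact hcmem))]
                  exact hnf1 c hc
                · rw [List.mem_singleton.mp hc]
                  exact PySem.Dict.get?_insert_self _ _ _)
              (by rw [hkeys2]; simp [List.append_assoc])
              (fun c hc => by
                rcases List.mem_append.mp hc with hc | hc
                · rcases List.mem_append.mp hc with hc2 | hc2
                  · exact Or.inl hc2
                  · exact Or.inr (Or.inl (List.mem_singleton.mp hc2))
                · exact Or.inr (Or.inr (List.mem_singleton.mp hc)))
              (fun h => PySem.Dict.nodup_keys_insert _ _ _ (PySem.Dict.nodup_keys_insert _ _ _ h))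
            simpa [List.append_assoc] using this

theorem loopA_done (ta tb : List Int) (f : Nat) (vA : PySem.Dict (List Int) Int)
    (q : List (List Int)) : loopA ta tb f vA q q.length = (false, -1) := by
  cases f with
  | zero => rfl
  | succ f => simp [loopA]

theorem loopB_nil (ta tb : List Int) (f : Nat) (v : PySem.Set (List Int)) (d : Int) :
    loopB ta tb f v [] d = (false, -1) := by
  cases f with
  | zero => rfl
  | succ f => rfl

-- the whole queue BFS equals the whole level BFS, given enough fuel on both sides
theorem loop_step (ta tb : List Int) (n : Int)
    (hwf : ∀ c, InCanon n c → InCanon n (applyLetterA c ta) ∧ InCanon n (applyLetterA c tb)) :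
    ∀ (fB : Nat) (fA : Nat) (u F : List (List Int)) (vA : PySem.Dict (List Int) Int) (d : Int),
    (∀ c ∈ F, vA.get? c = some d) →
    vA.keys = u ++ F →
    vA.keys.Nodup →
    (∀ c ∈ vA.keys, InCanon n c) →
    2 ^ n.toNat ≤ fA + u.length →
    2 ^ n.toNat + 1 ≤ fB + u.length + F.length →
    loopA ta tb fA vA (u ++ F) u.length = loopB ta tb fB (u ++ F) F d := by
  intro fB
  induction fB with
  | zero =>
    intro fA u F vA d hF hkeys hnd hcanon hfA hfB
    exfalso
    have hcard : vA.keys.length ≤ 2 ^ n.toNat := card_canon n _ hnd hcanon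
    rw [hkeys] at hcard
    simp only [List.length_append] at hcard
    omega
  | succ b ihB =>
    intro fA u F vA d hF hkeys hnd hcanon hfA hfB
    cases F with
    | nil =>
      rw [List.append_nil]
      rw [loopB_nil]
      exact loopA_done ta tb fA vA u
    | cons cur rest =>
      have hcard : vA.keys.length ≤ 2 ^ n.toNat := card_canon n _ hnd hcanon
      have hlenq : u.length + (cur :: rest).length ≤ 2 ^ n.toNat := by
        rw [hkeys] at hcard
        simpa [List.length_append] using hcard
      have hgF : (cur :: rest).length ≤ fA := by omega
      obtain ⟨l1, l2⟩ := level_step ta tb d (cur :: rest) (fA - (cur :: rest).length) u [] vA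
        hF (by simp) (by simpa using hkeys)
      simp only [List.append_nil] at l1 l2
      have hfA' : (cur :: rest).length + (fA - (cur :: rest).length) = fA := by omega
      rw [hfA'] at l1 l2
      cases hlev : levelB ta tb (cur :: rest) (u ++ cur :: rest) [] d with
      | inl r =>
        rw [l1 r hlev]
        simp [loopB, hlev]
      | inr p =>
        obtain ⟨v', nf'⟩ := p
        obtain ⟨vA', k1, k2, k3, k4, k6, k5⟩ := l2 v' nf' hlev
        rw [k5]
        have hrhs : loopB ta tb (b + 1) (u ++ cur :: rest) (cur :: rest) d
            = loopB ta tb b v' nf' (d + 1) := by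
          simp only [loopB]
          rw [hlev]
        rw [hrhs, k2]
        cases nf' with
        | nil =>
          rw [List.append_nil, loopB_nil]
          exact loopA_done ta tb _ vA' (u ++ cur :: rest)
        | cons x xs =>
          have hcanon' : ∀ c ∈ vA'.keys, InCanon n c := by
            intro c hc
            rw [k1] at hc
            rcases List.mem_append.mp hc with hc | hc
            · exact hcanon c (by rw [hkeys]; exact hc)
            · rcases k4 c hc with hc0 | ⟨cc, hcc, hccc⟩
              · cases hc0
              · have hccK : InCanon n cc := hcanon cc (by
                  rw [hkeys]
                  exact List.mem_append_right _ hcc)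
                rcases hccc with rfl | rfl
                · exact (hwf cc hccK).1
                · exact (hwf cc hccK).2
          refine ihB (fA - (cur :: rest).length) (u ++ cur :: rest) (x :: xs) vA' (d + 1)
            k3 k1 (k6 hnd) hcanon' ?_ ?_
          · simp only [List.length_append]
            omega
          · simp only [List.length_append, List.length_cons] at hfB ⊢
            omega

-- the wellformedness transfer: under Pre_, applyLetterA maps canonical subsets to
-- canonical subsets
theorem hwf_of_pre (ta tb : List Int) (n : Int) (hpre : Pre_is_synchronizing_py ta tb n)
    (hn : ¬ (canonSet (PySem.List.pyRange 0 n 1)).length = 1) :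
    ∀ c, InCanon n c → InCanon n (applyLetterA c ta) ∧ InCanon n (applyLetterA c tb) := by
  have key : ∀ (t : List Int), (t.length : Int) = n → (∀ v ∈ t, 0 ≤ v ∧ v < n) →
      ∀ c, InCanon n c → InCanon n (applyLetterA c t) := by
    intro t hlen hval c hc
    constructor
    · exact sorted_canonSet _
    · intro x hx
      unfold applyLetterA at hx
      rw [mem_canonSet] at hx
      rcases List.mem_map.mp hx with ⟨s, hs, rfl⟩
      have hsr := hc.2 s hs
      have hin : PySem.Raise.InRange t.length s := by
        unfold PySem.Raise.InRange
        omega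
      exact hval _ (PySem.List.pyGetD_mem t 0 hin)
  rcases hpre with hn1 | ⟨ha1, hb1, ha2, hb2⟩
  · rcases Int.lt_or_le n 1 with h0 | h1
    · intro c hc
      have hc0 : c = [] := InCanon_of_nonpos (by omega) hc
      subst hc0
      constructor <;> exact ⟨List.Pairwise.nil, by simp [applyLetterA, canonSet]⟩
    · exfalso
      have hn1' : n = 1 := by omega
      subst hn1'
      exact hn (by decide)
  · exact fun c hc => ⟨key ta ha1 ha2 c hc, key tb hb1 hb2 c hc⟩

-- A equals the level BFS
theorem A_eq_loopB : ∀ ta tb n, Pre_is_synchronizing_py ta tb n →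
    is_synchronizing_py ta tb n =
      (if (canonSet (PySem.List.pyRange 0 n 1)).length = 1 then ((true : Bool), (0 : Int))
       else loopB ta tb (2 ^ n.toNat + 1) [canonSet (PySem.List.pyRange 0 n 1)]
         [canonSet (PySem.List.pyRange 0 n 1)] 0) := by
  intro ta tb n hpre
  unfold is_synchronizing_py
  by_cases hs : (canonSet (PySem.List.pyRange 0 n 1)).length = 1
  · simp [hs]
  · simp only [hs, if_false]
    have hstart : ∀ x ∈ canonSet (PySem.List.pyRange 0 n 1), 0 ≤ x ∧ x < n := by
      intro x hx
      rw [mem_canonSet, PySem.List.mem_pyRange_one] at hx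
      exact hx
    have := loop_step ta tb n (hwf_of_pre ta tb n hpre hs) (2 ^ n.toNat + 1) (2 ^ n.toNat + 1)
      [] [canonSet (PySem.List.pyRange 0 n 1)]
      (PySem.Dict.empty.insert (canonSet (PySem.List.pyRange 0 n 1)) 0) 0
      (by
        intro c hc
        rw [List.mem_singleton.mp hc]
        exact PySem.Dict.get?_insert_self _ _ _)
      (by
        rw [PySem.Dict.keys_insert_of_not_contains _ _ (by rfl)]
        rfl)
      (by
        rw [PySem.Dict.keys_insert_of_not_contains _ _ (by rfl)]
        simp)
      (by
        intro c hc
        rw [PySem.Dict.keys_insert_of_not_contains _ _ (by rfl)] at hc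
        have : c = canonSet (PySem.List.pyRange 0 n 1) := by simpa using hc
        subst this
        exact ⟨sorted_canonSet _, hstart⟩)
      (by simp)
      (by simp)
    simpa using this

-- ----- B's family iteration vs the level BFS -----

theorem mem_famIns (x y : List Int) (l : List (List Int)) :
    y ∈ famIns x l ↔ y = x ∨ y ∈ l := by
  induction l with
  | nil => simp [famIns]
  | cons z zs ih =>
    simp only [famIns]
    split_ifs with h1 h2
    · simp only [List.mem_cons]
    · subst h2
      simp only [List.mem_cons]
      tauto
    · simp only [List.mem_cons, ih]
      tauto

theorem mem_famCanon (y : List Int) (l : List (List Int)) : y ∈ famCanon l ↔ y ∈ l := by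
  induction l with
  | nil => simp [famCanon]
  | cons z zs ih =>
    simp only [famCanon, List.foldr_cons] at *
    rw [mem_famIns, ih]
    simp [List.mem_cons]

theorem mem_famStep (ta tb : List Int) (L : List (List Int)) (c : List Int) :
    c ∈ famStep ta tb L ↔ ∃ cc ∈ L, c = applyLetterA cc ta ∨ c = applyLetterA cc tb := by
  unfold famStep
  rw [mem_famCanon, List.mem_flatMap]
  constructor
  · rintro ⟨cc, hcc, hm⟩
    simp only [canonSet_map_eq_applyLetterA, List.mem_cons, List.not_mem_nil, or_false] at hm
    exact ⟨cc, hcc, hm⟩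
  · rintro ⟨cc, hcc, hm⟩
    refine ⟨cc, hcc, ?_⟩
    simp only [canonSet_map_eq_applyLetterA, List.mem_cons, List.not_mem_nil, or_false]
    exact hm

def hasSingFam (L : List (List Int)) : Prop := ∃ S ∈ L, S.length = 1

theorem any_eq_hasSingFam (L : List (List Int)) :
    (L.any (fun S => S.length == 1)) = true ↔ hasSingFam L := by
  simp [List.any_eq_true, hasSingFam]

def famIter (ta tb : List Int) (L0 : List (List Int)) : Nat → List (List Int)
  | 0 => L0
  | t + 1 => famStep ta tb (famIter ta tb L0 t)

theorem famIter_shift (ta tb : List Int) (L0 : List (List Int)) {j t : Nat}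
    (h : famIter ta tb L0 j = famIter ta tb L0 t) :
    ∀ s, famIter ta tb L0 (j + s) = famIter ta tb L0 (t + s) := by
  intro s
  induction s with
  | zero => simpa using h
  | succ s ih =>
    have : j + (s + 1) = (j + s) + 1 := by omega
    rw [this]
    have h2 : t + (s + 1) = (t + s) + 1 := by omega
    rw [h2]
    simp only [famIter]
    rw [ih]

theorem periodic_no_sing (ta tb : List Int) (L0 : List (List Int)) {j t : Nat}
    (hjt : j < t) (heq : famIter ta tb L0 j = famIter ta tb L0 t)
    (hns : ∀ s ≤ t, ¬ hasSingFam (famIter ta tb L0 s)) :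
    ∀ m, ¬ hasSingFam (famIter ta tb L0 m) := by
  intro m
  induction m using Nat.strong_induction_on with
  | _ m ih =>
    by_cases hm : m ≤ t
    · exact hns m hm
    · have hs : t ≤ m := by omega
      have : famIter ta tb L0 (j + (m - t)) = famIter ta tb L0 m := by
        have := famIter_shift ta tb L0 heq (m - t)
        rwa [Nat.add_sub_cancel' hs] at this
      rw [← this]
      exact ih (j + (m - t)) (by omega)

theorem loopF_no_sing (ta tb : List Int) (L0 : List (List Int))
    (hns : ∀ m, ¬ hasSingFam (famIter ta tb L0 m)) :
    ∀ (fuel : Nat) (seen : List (List (List Int))) (t : Nat) (d : Int),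
    loopF ta tb fuel seen (famIter ta tb L0 t) d = (false, -1) := by
  intro fuel
  induction fuel with
  | zero => intro seen t d; rfl
  | succ f ih =>
    intro seen t d
    simp only [loopF]
    by_cases hmem : famIter ta tb L0 t ∈ seen
    · rw [if_pos hmem]
    · rw [if_neg hmem]
      have hany : ((famStep ta tb (famIter ta tb L0 t)).any (fun S => S.length == 1)) = false := by
        rw [Bool.eq_false_iff]
        intro h
        exact hns (t + 1) ((any_eq_hasSingFam _).mp h)
      simp only [hany, Bool.false_eq_true, if_false]
      exact ih (seen ++ [famIter ta tb L0 t]) (t + 1) (d + 1)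

-- if some frontier element has a singleton image, levelB returns early with (true, d+1)
theorem levelB_sing (ta tb : List Int) (d : Int) :
    ∀ (F : List (List Int)) (v : PySem.Set (List Int)) (nf : List (List Int)),
    (∃ c ∈ F, (applyLetterA c ta).length = 1 ∨ (applyLetterA c tb).length = 1) →
    levelB ta tb F v nf d = .inl (true, d + 1) := by
  intro F
  induction F with
  | nil => rintro v nf ⟨c, hc, _⟩; cases hc
  | cons cur rest ih =>
    rintro v nf ⟨c, hc, hsing⟩
    simp only [levelB, canonSet_map_eq_applyLetterA]
    rcases List.mem_cons.mp hc with rfl | hc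
    · rcases hsing with h1 | h2
      · rw [if_pos h1]
      · by_cases h1 : (applyLetterA c ta).length = 1
        · rw [if_pos h1]
        · rw [if_neg h1, if_pos h2]
    · by_cases h1 : (applyLetterA cur ta).length = 1
      · rw [if_pos h1]
      · rw [if_neg h1]
        by_cases h2 : (applyLetterA cur tb).length = 1
        · rw [if_pos h2]
        · rw [if_neg h2]
          exact ih _ _ ⟨c, hc, hsing⟩

theorem nodup_append_one {α : Type} {v : List α} {x : α} (h : v.Nodup) (hx : x ∉ v) :
    (v ++ [x]).Nodup := by
  rw [List.nodup_append]
  refine ⟨h, List.nodup_singleton x, ?_⟩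
  intro a ha b hb he
  subst he
  rw [List.mem_singleton.mp hb] at ha
  exact hx ha

-- if no frontier element has a singleton image, levelB appends the same fresh images Δ
-- to the visited set and to nf
theorem levelB_not_sing (ta tb : List Int) (d : Int) :
    ∀ (F : List (List Int)) (v : PySem.Set (List Int)) (nf : List (List Int)),
    (∀ c ∈ F, (applyLetterA c ta).length ≠ 1 ∧ (applyLetterA c tb).length ≠ 1) →
    ∃ Δ : List (List Int),
      levelB ta tb F v nf d = .inr (v ++ Δ, nf ++ Δ) ∧
      (∀ c ∈ Δ, ∃ cc ∈ F, c = applyLetterA cc ta ∨ c = applyLetterA cc tb) ∧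
      (∀ cc ∈ F, applyLetterA cc ta ∈ v ++ Δ ∧ applyLetterA cc tb ∈ v ++ Δ) ∧
      (v.Nodup → (v ++ Δ).Nodup) := by
  intro F
  induction F with
  | nil =>
    intro v nf _
    exact ⟨[], by simp [levelB], by simp, by simp, by simp⟩
  | cons cur rest ih =>
    intro v nf hns
    obtain ⟨h1, h2⟩ := hns cur List.mem_cons_self
    simp only [levelB, canonSet_map_eq_applyLetterA, if_neg h1, if_neg h2]
    -- first letter
    by_cases hc1 : PySem.Set.contains v (applyLetterA cur ta) = true
    · simp only [hc1, if_true]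
      have hv1 : applyLetterA cur ta ∈ v := (PySem.Set.contains_iff _ _).mp hc1
      by_cases hc2 : PySem.Set.contains v (applyLetterA cur tb) = true
      · simp only [hc2, if_true]
        have hv2 : applyLetterA cur tb ∈ v := (PySem.Set.contains_iff _ _).mp hc2
        obtain ⟨Δ, hres, hΔ, himg, hnd⟩ := ih v nf (fun c hc => hns c (List.mem_cons_of_mem _ hc))
        refine ⟨Δ, hres, fun c hc => ?_, fun cc hcc => ?_, hnd⟩
        · obtain ⟨cc, hcc, h⟩ := hΔ c hc
          exact ⟨cc, List.mem_cons_of_mem _ hcc, h⟩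
        · rcases List.mem_cons.mp hcc with rfl | hcc
          · exact ⟨List.mem_append_left _ hv1, List.mem_append_left _ hv2⟩
          · exact himg cc hcc
      · have hc2' : PySem.Set.contains v (applyLetterA cur tb) = false := by
          rwa [Bool.not_eq_true] at hc2
        simp only [hc2', Bool.false_eq_true, if_false]
        rw [set_add_of_contains_false hc2']
        obtain ⟨Δ, hres, hΔ, himg, hnd⟩ := ih (v ++ [applyLetterA cur tb]) (nf ++ [applyLetterA cur tb])
          (fun c hc => hns c (List.mem_cons_of_mem _ hc))
        refine ⟨[applyLetterA cur tb] ++ Δ, ?_, fun c hc => ?_, fun cc hcc => ?_, ?_⟩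
        · rw [hres]; simp [List.append_assoc]
        · rcases List.mem_append.mp hc with hc | hc
          · refine ⟨cur, List.mem_cons_self, Or.inr ?_⟩
            rw [List.mem_singleton.mp hc]
          · obtain ⟨cc, hcc, h⟩ := hΔ c hc
            exact ⟨cc, List.mem_cons_of_mem _ hcc, h⟩
        · rcases List.mem_cons.mp hcc with rfl | hcc
          · constructor
            · exact List.mem_append_left _ hv1
            · rw [← List.append_assoc]
              exact List.mem_append_left _ (List.mem_append_right _ (List.mem_singleton_self _))
          · have := himg cc hcc
            rw [← List.append_assoc]
            exact this
        · intro hvnd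
          rw [← List.append_assoc]
          apply hnd
          have hnew : applyLetterA cur tb ∉ v := by
            intro hm
            rw [(PySem.Set.contains_iff v _).mpr hm] at hc2'
            exact absurd hc2' (by simp)
          exact nodup_append_one hvnd hnew
    · have hc1' : PySem.Set.contains v (applyLetterA cur ta) = false := by
        rwa [Bool.not_eq_true] at hc1
      simp only [hc1', Bool.false_eq_true, if_false]
      rw [set_add_of_contains_false hc1']
      have hv1new : applyLetterA cur ta ∉ v := by
        intro hm
        rw [(PySem.Set.contains_iff v _).mpr hm] at hc1'
        exact absurd hc1' (by simp)
      by_cases hc2 : PySem.Set.contains (v ++ [applyLetterA cur ta]) (applyLetterA cur tb) = true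
      · simp only [hc2, if_true]
        have hv2 : applyLetterA cur tb ∈ v ++ [applyLetterA cur ta] :=
          (PySem.Set.contains_iff _ _).mp hc2
        obtain ⟨Δ, hres, hΔ, himg, hnd⟩ := ih (v ++ [applyLetterA cur ta]) (nf ++ [applyLetterA cur ta])
          (fun c hc => hns c (List.mem_cons_of_mem _ hc))
        refine ⟨[applyLetterA cur ta] ++ Δ, ?_, fun c hc => ?_, fun cc hcc => ?_, ?_⟩
        · rw [hres]; simp [List.append_assoc]
        · rcases List.mem_append.mp hc with hc | hc
          · refine ⟨cur, List.mem_cons_self, Or.inl ?_⟩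
            rw [List.mem_singleton.mp hc]
          · obtain ⟨cc, hcc, h⟩ := hΔ c hc
            exact ⟨cc, List.mem_cons_of_mem _ hcc, h⟩
        · rcases List.mem_cons.mp hcc with rfl | hcc
          · rw [← List.append_assoc]
            constructor
            · exact List.mem_append_left _ (List.mem_append_right _ (List.mem_singleton_self _))
            · exact List.mem_append_left _ hv2
          · have := himg cc hcc
            rw [← List.append_assoc]
            exact this
        · intro hvnd
          rw [← List.append_assoc]
          apply hnd
          exact nodup_append_one hvnd hv1new
      · have hc2' : PySem.Set.contains (v ++ [applyLetterA cur ta]) (applyLetterA cur tb) = false := by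
          rwa [Bool.not_eq_true] at hc2
        simp only [hc2', Bool.false_eq_true, if_false]
        rw [set_add_of_contains_false hc2']
        have hv2new : applyLetterA cur tb ∉ v ++ [applyLetterA cur ta] := by
          intro hm
          rw [(PySem.Set.contains_iff _ _).mpr hm] at hc2'
          exact absurd hc2' (by simp)
        obtain ⟨Δ, hres, hΔ, himg, hnd⟩ := ih ((v ++ [applyLetterA cur ta]) ++ [applyLetterA cur tb])
          ((nf ++ [applyLetterA cur ta]) ++ [applyLetterA cur tb])
          (fun c hc => hns c (List.mem_cons_of_mem _ hc))
        refine ⟨[applyLetterA cur ta] ++ [applyLetterA cur tb] ++ Δ, ?_, fun c hc => ?_, fun cc hcc => ?_, ?_⟩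
        · rw [hres]; simp [List.append_assoc]
        · rcases List.mem_append.mp hc with hc | hc
          · rcases List.mem_append.mp hc with hc | hc
            · refine ⟨cur, List.mem_cons_self, Or.inl ?_⟩
              rw [List.mem_singleton.mp hc]
            · refine ⟨cur, List.mem_cons_self, Or.inr ?_⟩
              rw [List.mem_singleton.mp hc]
          · obtain ⟨cc, hcc, h⟩ := hΔ c hc
            exact ⟨cc, List.mem_cons_of_mem _ hcc, h⟩
        · rcases List.mem_cons.mp hcc with rfl | hcc
          · constructor
            · rw [← List.append_assoc, ← List.append_assoc]
              refine List.mem_append_left _ ?_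
              rw [List.append_assoc]
              exact List.mem_append_right _ (by simp)
            · rw [← List.append_assoc, ← List.append_assoc]
              refine List.mem_append_left _ ?_
              rw [List.append_assoc]
              exact List.mem_append_right _ (by simp)
          · have := himg cc hcc
            rw [← List.append_assoc, ← List.append_assoc]
            exact this
        · intro hvnd
          rw [← List.append_assoc, ← List.append_assoc]
          apply hnd
          exact nodup_append_one (nodup_append_one hvnd hv1new) hv2new

-- if no singleton is ever produced, the level BFS returns (false, -1)
theorem loopB_no_sing (ta tb : List Int) (L0 : List (List Int))
    (hns : ∀ m, ¬ hasSingFam (famIter ta tb L0 m)) :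
    ∀ (fB : Nat) (t : Nat) (v : PySem.Set (List Int)) (F : List (List Int)) (d : Int),
    (∀ c ∈ F, c ∈ famIter ta tb L0 t) →
    loopB ta tb fB v F d = (false, -1) := by
  intro fB
  induction fB with
  | zero => intro t v F d _; rfl
  | succ f ih =>
    intro t v F d hFt
    cases F with
    | nil => rfl
    | cons cur rest =>
      have hnosing : ∀ c ∈ cur :: rest,
          (applyLetterA c ta).length ≠ 1 ∧ (applyLetterA c tb).length ≠ 1 := by
        intro c hc
        constructor
        · intro h1
          exact hns (t + 1) ⟨applyLetterA c ta,
            (mem_famStep ta tb _ _).mpr ⟨c, hFt c hc, Or.inl rfl⟩, h1⟩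
        · intro h2
          exact hns (t + 1) ⟨applyLetterA c tb,
            (mem_famStep ta tb _ _).mpr ⟨c, hFt c hc, Or.inr rfl⟩, h2⟩
      obtain ⟨Δ, hres, hΔ, _, _⟩ := levelB_not_sing ta tb d (cur :: rest) v [] hnosing
      simp only [loopB]
      rw [hres]
      refine ih (t + 1) (v ++ Δ) ([] ++ Δ) (d + 1) ?_
      intro c hc
      simp only [List.nil_append] at hc
      obtain ⟨cc, hcc, h⟩ := hΔ c hc
      rcases h with rfl | rfl
      · exact (mem_famStep ta tb _ _).mpr ⟨cc, hFt cc hcc, Or.inl rfl⟩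
      · exact (mem_famStep ta tb _ _).mpr ⟨cc, hFt cc hcc, Or.inr rfl⟩

-- a visited set closed under both letters and containing some famIter level traps the
-- whole trajectory: no singleton ever appears
theorem closed_no_sing (ta tb : List Int) (L0 : List (List Int)) (V : List (List Int))
    (t0 : Nat)
    (hcl : ∀ c ∈ V, (applyLetterA c ta).length ≠ 1 ∧ (applyLetterA c tb).length ≠ 1 ∧
      applyLetterA c ta ∈ V ∧ applyLetterA c tb ∈ V)
    (hsub : ∀ c ∈ famIter ta tb L0 t0, c ∈ V)
    (hns : ∀ s ≤ t0, ¬ hasSingFam (famIter ta tb L0 s)) :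
    ∀ m, ¬ hasSingFam (famIter ta tb L0 m) := by
  have haux : ∀ s, ∀ c ∈ famIter ta tb L0 (t0 + s), c ∈ V := by
    intro s
    induction s with
    | zero => simpa using hsub
    | succ s ih =>
      intro c hc
      have : t0 + (s + 1) = (t0 + s) + 1 := by omega
      rw [this] at hc
      obtain ⟨cc, hcc, h⟩ := (mem_famStep ta tb _ _).mp hc
      have hccV := ih cc hcc
      rcases h with rfl | rfl
      · exact (hcl cc hccV).2.2.1
      · exact (hcl cc hccV).2.2.2
  intro m
  by_cases hm : m ≤ t0
  · exact hns m hm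
  · rintro ⟨S, hS, hlen⟩
    have hm' : m = (t0 + (m - t0 - 1)) + 1 := by omega
    rw [hm'] at hS
    obtain ⟨cc, hcc, h⟩ := (mem_famStep ta tb _ _).mp hS
    have hccV := haux (m - t0 - 1) cc hcc
    rcases h with rfl | rfl
    · exact (hcl cc hccV).1 hlen
    · exact (hcl cc hccV).2.1 hlen

-- falling out of loopB with an empty frontier
theorem loopB_frontier_nil (ta tb : List Int) (f : Nat) (v : PySem.Set (List Int)) (d : Int) :
    loopB ta tb f v [] d = (false, -1) := loopB_nil ta tb f v d

-- main lockstep: the level BFS equals the family iteration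
theorem loop_fam (ta tb : List Int) (n : Int)
    (hwf : ∀ c, InCanon n c → InCanon n (applyLetterA c ta) ∧ InCanon n (applyLetterA c tb))
    (L0 : List (List Int)) :
    ∀ (fF fB : Nat) (t : Nat) (P F : List (List Int)) (d : Int),
    (∀ c ∈ F, c ∈ famIter ta tb L0 t) →
    (∀ c ∈ famIter ta tb L0 t, c ∈ P ++ F) →
    (∀ c ∈ P, (applyLetterA c ta).length ≠ 1 ∧ (applyLetterA c tb).length ≠ 1 ∧
      applyLetterA c ta ∈ P ++ F ∧ applyLetterA c tb ∈ P ++ F) →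
    (P ++ F).Nodup →
    (∀ c ∈ P ++ F, InCanon n c) →
    (∀ s, s ≤ t → ¬ hasSingFam (famIter ta tb L0 s)) →
    2 ^ n.toNat + 1 ≤ fF + (P ++ F).length →
    2 ^ n.toNat + 2 ≤ fB + (P ++ F).length →
    loopB ta tb fB (P ++ F) F d
      = loopF ta tb fF ((List.range t).map (famIter ta tb L0)) (famIter ta tb L0 t) (d + 1) := by
  intro fF
  induction fF with
  | zero =>
    intro fB t P F d _ _ _ hnd hcanon _ hfF _
    exfalso
    have := card_canon n (P ++ F) hnd hcanon
    omega
  | succ f ihF =>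
    intro fB t P F d hFL hLV hcl hnd hcanon hns hfF hfB
    have hcard := card_canon n (P ++ F) hnd hcanon
    have hfB1 : ∃ fb', fB = fb' + 1 := ⟨fB - 1, by omega⟩
    obtain ⟨fb', rfl⟩ := hfB1
    by_cases hmem : famIter ta tb L0 t ∈ (List.range t).map (famIter ta tb L0)
    · -- a repeated family: both sides return (false, -1)
      obtain ⟨j, hjr, heq⟩ := List.mem_map.mp hmem
      have hj : j < t := List.mem_range.mp hjr
      have hallns : ∀ m, ¬ hasSingFam (famIter ta tb L0 m) :=
        periodic_no_sing ta tb L0 hj heq (fun s hs => hns s hs)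
      rw [loopB_no_sing ta tb L0 hallns (fb' + 1) t (P ++ F) F d hFL]
      simp only [loopF, if_pos hmem]
    · by_cases hsing : hasSingFam (famIter ta tb L0 (t + 1))
      · -- singleton found in the next family: both return (true, d+1)
        have hrhs : loopF ta tb (f + 1) ((List.range t).map (famIter ta tb L0))
            (famIter ta tb L0 t) (d + 1) = (true, d + 1) := by
          simp only [loopF, if_neg hmem]
          have : ((famStep ta tb (famIter ta tb L0 t)).any (fun S => S.length == 1)) = true :=
            (any_eq_hasSingFam _).mpr hsing
          rw [if_pos this]
        rw [hrhs]
        obtain ⟨S, hS, hlen⟩ := hsing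
        obtain ⟨cc, hcc, hh⟩ := (mem_famStep ta tb _ _).mp hS
        have hccPF := hLV cc hcc
        have hccF : cc ∈ F := by
          rcases List.mem_append.mp hccPF with hP | hF'
          · exfalso
            rcases hh with rfl | rfl
            · exact (hcl cc hP).1 hlen
            · exact (hcl cc hP).2.1 hlen
          · exact hF'
        have hFne : F ≠ [] := fun h => by subst h; cases hccF
        obtain ⟨cur, rest, rfl⟩ : ∃ cur rest, F = cur :: rest := by
          cases F with
          | nil => exact absurd rfl hFne
          | cons a b => exact ⟨a, b, rfl⟩
        have hsel : (applyLetterA cc ta).length = 1 ∨ (applyLetterA cc tb).length = 1 := by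
          rcases hh with rfl | rfl
          · exact Or.inl hlen
          · exact Or.inr hlen
        have hlev := levelB_sing ta tb d (cur :: rest) (P ++ cur :: rest) [] ⟨cc, hccF, hsel⟩
        simp [loopB, hlev]
      · -- no singleton at the next level
        have hnosing : ∀ c ∈ F,
            (applyLetterA c ta).length ≠ 1 ∧ (applyLetterA c tb).length ≠ 1 := by
          intro c hc
          constructor
          · intro h1
            exact hsing ⟨applyLetterA c ta,
              (mem_famStep ta tb _ _).mpr ⟨c, hFL c hc, Or.inl rfl⟩, h1⟩
          · intro h2
            exact hsing ⟨applyLetterA c tb,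
              (mem_famStep ta tb _ _).mpr ⟨c, hFL c hc, Or.inr rfl⟩, h2⟩
        have hrhs : loopF ta tb (f + 1) ((List.range t).map (famIter ta tb L0))
            (famIter ta tb L0 t) (d + 1)
            = loopF ta tb f ((List.range (t + 1)).map (famIter ta tb L0))
              (famIter ta tb L0 (t + 1)) (d + 1 + 1) := by
          simp only [loopF, if_neg hmem]
          have : ((famStep ta tb (famIter ta tb L0 t)).any (fun S => S.length == 1)) = false := by
            rw [Bool.eq_false_iff]
            intro h
            exact hsing ((any_eq_hasSingFam _).mp h)
          rw [if_neg (by simp [this])]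
          have hr : (List.range (t + 1)).map (famIter ta tb L0)
              = (List.range t).map (famIter ta tb L0) ++ [famIter ta tb L0 t] := by
            rw [List.range_succ, List.map_append, List.map_singleton]
          rw [hr]
          have hfs : famStep ta tb (famIter ta tb L0 t) = famIter ta tb L0 (t + 1) := rfl
          rw [hfs]
        rw [hrhs]
        have hns' : ∀ s, s ≤ t + 1 → ¬ hasSingFam (famIter ta tb L0 s) := by
          intro s hs
          rcases Nat.lt_or_ge s (t + 1) with h | h
          · exact hns s (by omega)
          · have : s = t + 1 := by omega
            rw [this]; exact hsing
        cases F with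
        | nil =>
          -- frontier empty: loopB is done; the visited set is closed, so no singleton ever
          rw [loopB_frontier_nil]
          have hallns : ∀ m, ¬ hasSingFam (famIter ta tb L0 m) := by
            refine closed_no_sing ta tb L0 P t ?_ (by simpa using hLV) (fun s hs => hns s hs)
            intro c hc
            have := hcl c hc
            simpa using this
          rw [loopF_no_sing ta tb L0 hallns f _ (t + 1) (d + 1 + 1)]
        | cons cur rest =>
          obtain ⟨Δ, hres, hΔ, himg, hndp⟩ :=
            levelB_not_sing ta tb d (cur :: rest) (P ++ cur :: rest) [] hnosing
          simp only [loopB]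
          rw [hres]
          simp only [List.nil_append]
          -- membership facts for the next state
          have hΔfam : ∀ c ∈ Δ, c ∈ famIter ta tb L0 (t + 1) := by
            intro c hc
            obtain ⟨cc, hcc, h⟩ := hΔ c hc
            rcases h with rfl | rfl
            · exact (mem_famStep ta tb _ _).mpr ⟨cc, hFL cc hcc, Or.inl rfl⟩
            · exact (mem_famStep ta tb _ _).mpr ⟨cc, hFL cc hcc, Or.inr rfl⟩
          have hLV' : ∀ c ∈ famIter ta tb L0 (t + 1), c ∈ (P ++ cur :: rest) ++ Δ := by
            intro c hc
            obtain ⟨cc, hcc, h⟩ := (mem_famStep ta tb _ _).mp hc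
            have hccPF := hLV cc hcc
            rcases List.mem_append.mp hccPF with hP | hF'
            · rcases h with rfl | rfl
              · exact List.mem_append_left _ (hcl cc hP).2.2.1
              · exact List.mem_append_left _ (hcl cc hP).2.2.2
            · rcases h with rfl | rfl
              · exact (himg cc hF').1
              · exact (himg cc hF').2
          have hcl' : ∀ c ∈ P ++ cur :: rest,
              (applyLetterA c ta).length ≠ 1 ∧ (applyLetterA c tb).length ≠ 1 ∧
              applyLetterA c ta ∈ (P ++ cur :: rest) ++ Δ ∧
              applyLetterA c tb ∈ (P ++ cur :: rest) ++ Δ := by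
            intro c hc
            rcases List.mem_append.mp hc with hP | hF'
            · obtain ⟨x1, x2, x3, x4⟩ := hcl c hP
              exact ⟨x1, x2, List.mem_append_left _ x3, List.mem_append_left _ x4⟩
            · obtain ⟨x1, x2⟩ := hnosing c hF'
              exact ⟨x1, x2, (himg c hF').1, (himg c hF').2⟩
          have hcanon' : ∀ c ∈ (P ++ cur :: rest) ++ Δ, InCanon n c := by
            intro c hc
            rcases List.mem_append.mp hc with h | h
            · exact hcanon c h
            · obtain ⟨cc, hcc, hcceq⟩ := hΔ c h
              have : InCanon n cc := hcanon cc (List.mem_append_right _ hcc)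
              rcases hcceq with rfl | rfl
              · exact (hwf cc this).1
              · exact (hwf cc this).2
          cases hΔcase : Δ with
          | nil =>
            -- no new subsets: loopB terminates next step; visited set is closed
            subst hΔcase
            rw [loopB_frontier_nil]
            have hallns : ∀ m, ¬ hasSingFam (famIter ta tb L0 m) := by
              refine closed_no_sing ta tb L0 (P ++ cur :: rest) (t + 1) ?_
                (by simpa using hLV') hns'
              intro c hc
              have := hcl' c hc
              simpa using this
            rw [loopF_no_sing ta tb L0 hallns f _ (t + 1) (d + 1 + 1)]
          | cons x xs =>
            subst hΔcase
            have := ihF fb' (t + 1) (P ++ cur :: rest) (x :: xs) (d + 1)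
              hΔfam hLV' hcl' (hndp hnd) hcanon' hns'
              (by simp only [List.length_append, List.length_cons] at hfF hfB ⊢; omega)
              (by simp only [List.length_append, List.length_cons] at hfF hfB ⊢; omega)
            simpa using this

-- assembling: the level BFS from the start equals B
theorem B_eq_loopB : ∀ ta tb n, Pre_is_synchronizing_py ta tb n →
    (if (canonSet (PySem.List.pyRange 0 n 1)).length = 1 then ((true : Bool), (0 : Int))
     else loopB ta tb (2 ^ n.toNat + 1) [canonSet (PySem.List.pyRange 0 n 1)]
       [canonSet (PySem.List.pyRange 0 n 1)] 0)
    = is_synchronizing_py_alt ta tb n := by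
  intro ta tb n hpre
  unfold is_synchronizing_py_alt
  by_cases hs : (canonSet (PySem.List.pyRange 0 n 1)).length = 1
  · simp [hs]
  · simp only [hs, if_false]
    set st := canonSet (PySem.List.pyRange 0 n 1) with hst
    have hstc : InCanon n st := by
      refine ⟨sorted_canonSet _, ?_⟩
      intro x hx
      rw [hst, mem_canonSet, PySem.List.mem_pyRange_one] at hx
      exact hx
    have htn : (max n 0).toNat = n.toNat := by omega
    have htn2 : (2 : Nat) ^ (max n 0).toNat = 2 ^ n.toNat := by rw [htn]
    rw [htn2]
    have hmain := loop_fam ta tb n (hwf_of_pre ta tb n hpre hs) [st]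
      (2 ^ n.toNat) (2 ^ n.toNat + 1) 0 [] [st] 0
      (by intro c hc; simpa [famIter] using hc)
      (by intro c hc; simpa [famIter] using hc)
      (by intro c hc; cases hc)
      (by simp)
      (by intro c hc
          have hcs : c = st := by simpa using hc
          rw [hcs]; exact hstc)
      (by
        intro s hs0
        have : s = 0 := by omega
        subst this
        rintro ⟨S, hS, hlen⟩
        have hSs : S = st := by simpa [famIter] using hS
        rw [hSs] at hlen
        exact hs hlen)
      (by simp)
      (by simp)
    simpa [famIter] using hmain

-- ===== VERDICT (by name: the statement is the Claim_ definition above) =====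
theorem is_synchronizing_py_spec : Claim_equal_is_synchronizing_py := by
  intro ta tb n _ hpre
  unfold Spec_is_synchronizing_py
  rw [A_eq_loopB ta tb n hpre, B_eq_loopB ta tb n hpre]
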